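-- pv_equiv track=rewrite | github.com/cms-sw/cmssw | HLTrigger/Configuration/python/Tools/confdb.py | consolidatePositiveList
-- ===== SOURCE A (Python) =====
-- def consolidatePositiveList(elements):
--   # consolidate a list of path selection and re-exclusions
--   # the result is the list of paths to be included in the dump
--   result = set()
--   for element in elements:
--     if element[0] == '-':
--       result.discard( element[1:] )
--     else:
--       result.add( element )
--   return sorted( element for element in result )
-- ===== SOURCE B (Python) =====
-- def consolidatePositiveList(elements):
--   # reverse pass: each path's fate is decided by its LAST mention
--   seen = set()
--   result = set()
--   for element in reversed(elements):
--     negative = element[0] == '-'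
--     name = element[1:] if negative else element
--     if name not in seen:
--       seen.add(name)
--       if not negative:
--         result.add(name)
--   return sorted(result)
-- ===== Notes on version B (the rewrite author's own statement) =====
-- stated objective: alternative
-- what changed: Instead of replaying every add/discard forward on one mutable set, B walks the list once in reverse with a 'seen' set, so each path is resolved by its last mention and earlier mentions are skipped.
import Mathlib
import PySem

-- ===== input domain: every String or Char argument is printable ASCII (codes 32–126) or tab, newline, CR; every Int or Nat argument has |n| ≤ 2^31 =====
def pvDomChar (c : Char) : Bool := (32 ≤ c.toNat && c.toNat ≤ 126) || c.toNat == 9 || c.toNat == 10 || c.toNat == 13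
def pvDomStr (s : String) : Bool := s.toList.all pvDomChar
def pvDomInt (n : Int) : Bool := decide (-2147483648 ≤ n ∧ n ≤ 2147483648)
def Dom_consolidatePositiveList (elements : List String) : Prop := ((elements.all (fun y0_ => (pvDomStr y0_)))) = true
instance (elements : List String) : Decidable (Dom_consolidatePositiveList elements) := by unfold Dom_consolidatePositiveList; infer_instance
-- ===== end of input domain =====

-- B replaces A's forward add/discard replay by a single reverse pass with a 'seen' set
-- (each path's fate decided by its last mention); alternative decomposition, same cost.

-- ===== PORT A =====
-- one loop iteration of A: add on a plain element, discard element[1:] on '-element'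
def pvStepA (result : PySem.Set String) (element : String) : PySem.Set String :=
  if PySem.Str.pyGet? element 0 = some '-' then
    PySem.Set.discard result (PySem.Str.slice element (some 1) none)
  else
    PySem.Set.add result element

def consolidatePositiveList (elements : List String) : List String :=
  let result := elements.foldl pvStepA PySem.Set.empty
  PySem.List.sorted result (fun element => element) false

-- ===== PORT B =====
-- one iteration of B's reverse loop over the state (seen, result)
def pvStepB (st : PySem.Set String × PySem.Set String) (element : String) :
    PySem.Set String × PySem.Set String :=
  let negative := PySem.Str.pyGet? element 0 = some '-'
  let name := if negative then PySem.Str.slice element (some 1) none else element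
  if PySem.Set.contains st.1 name then st
  else (PySem.Set.add st.1 name,
        if negative then st.2 else PySem.Set.add st.2 name)

def consolidatePositiveList_alt (elements : List String) : List String :=
  let st := elements.reverse.foldl pvStepB (PySem.Set.empty, PySem.Set.empty)
  PySem.List.sorted st.2 (fun element => element) false

-- ===== PRECONDITION & SPEC =====
-- Pre_ excludes lists containing the empty string, on which both Pythons raise IndexError (element[0]).
def Pre_consolidatePositiveList (elements : List String) : Prop := ∀ e ∈ elements, e ≠ ""
instance (elements : List String) : Decidable (Pre_consolidatePositiveList elements) := by
  unfold Pre_consolidatePositiveList; infer_instance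

def pvWitness_consolidatePositiveList : List String := ["path1", "-path1", "path2", "path2"]

def Spec_consolidatePositiveList (elements : List String) (out : List String) : Prop :=
  out = consolidatePositiveList_alt elements
instance (elements : List String) (out : List String) :
    Decidable (Spec_consolidatePositiveList elements out) := by
  unfold Spec_consolidatePositiveList; infer_instance

-- ===== CLAIM (what is proved, stated in full; the proofs are below) =====
def Claim_equal_consolidatePositiveList : Prop :=
  ∀ (elements : List String), Dom_consolidatePositiveList elements →
    Pre_consolidatePositiveList elements →
      Spec_consolidatePositiveList elements (consolidatePositiveList elements)

-- ===== LEMMAS AND PROOFS =====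

-- the name an element mentions, and whether the mention is an include
def pvName (e : String) : String :=
  if PySem.Str.pyGet? e 0 = some '-' then PySem.Str.slice e (some 1) none else e

def pvInc (e : String) : Bool := !(decide (PySem.Str.pyGet? e 0 = some '-'))

-- the last mention of x decides: scanning m forward, the first element naming x, as include/exclude
def pvDecide (m : List String) (x : String) : Option Bool :=
  (m.find? (fun e => pvName e == x)).map pvInc

lemma pvStepA_mem (s : PySem.Set String) (e x : String) :
    x ∈ pvStepA s e ↔ (if pvName e = x then pvInc e = true else x ∈ s) := by
  by_cases hneg : PySem.List.pyGet? e.toList 0 = some '-'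
  · by_cases h1 : PySem.Str.slice e (some 1) none = x
    · simp [pvStepA, pvName, pvInc, hneg, h1, PySem.Set.mem_discard]
    · have hxd : x ≠ PySem.Str.slice e (some 1) none := fun hc => h1 hc.symm
      simp [pvStepA, pvName, hneg, h1, PySem.Set.mem_discard, hxd]
  · by_cases h1 : e = x
    · subst h1
      simp [pvStepA, pvName, pvInc, hneg, PySem.Set.mem_add]
    · have hxd : x ≠ e := fun hc => h1 hc.symm
      simp [pvStepA, pvName, hneg, h1, PySem.Set.mem_add, hxd]

lemma pvDecide_cons (e : String) (rest : List String) (x : String) :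
    pvDecide (e :: rest) x =
      if pvName e = x then some (pvInc e) else pvDecide rest x := by
  by_cases h : pvName e = x
  · simp [pvDecide, h]
  · simp [pvDecide, h]

lemma foldA_mem (l : List String) (s : PySem.Set String) (x : String) :
    x ∈ l.foldl pvStepA s ↔
      (pvDecide l.reverse x = some true ∨ (pvDecide l.reverse x = none ∧ x ∈ s)) := by
  induction l using List.reverseRecOn generalizing s with
  | nil => simp [pvDecide]
  | append_singleton xs e ih =>
    rw [List.foldl_append, List.foldl_cons, List.foldl_nil, List.reverse_append]
    simp only [List.reverse_cons, List.reverse_nil, List.nil_append, List.cons_append]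
    rw [pvStepA_mem, pvDecide_cons]
    by_cases h : pvName e = x
    · simp [h]
    · rw [if_neg h, if_neg h]
      exact ih s

lemma pvStepB_eq (seen res : PySem.Set String) (e : String) :
    pvStepB (seen, res) e =
      if PySem.Set.contains seen (pvName e) then (seen, res)
      else (PySem.Set.add seen (pvName e),
            if pvInc e = true then PySem.Set.add res (pvName e) else res) := by
  by_cases hneg : PySem.List.pyGet? e.toList 0 = some '-' <;>
    simp [pvStepB, pvName, pvInc, hneg]

lemma foldB_mem (m : List String) (seen res : PySem.Set String) (x : String) :
    x ∈ (m.foldl pvStepB (seen, res)).2 ↔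
      (x ∈ res ∨ (x ∉ seen ∧ pvDecide m x = some true)) := by
  induction m generalizing seen res with
  | nil => simp [pvDecide]
  | cons e rest ih =>
    rw [List.foldl_cons, pvStepB_eq, pvDecide_cons]
    by_cases hseen : PySem.Set.contains seen (pvName e)
    · rw [if_pos hseen, ih]
      have hm : pvName e ∈ seen := (PySem.Set.contains_iff _ _).1 hseen
      by_cases h : pvName e = x
      · have hx : x ∈ seen := h ▸ hm
        simp [h, hx]
      · rw [if_neg h]
    · rw [if_neg hseen]
      have hm : pvName e ∉ seen := fun hc => hseen ((PySem.Set.contains_iff _ _).2 hc)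
      by_cases h : pvName e = x
      · rw [if_pos h]
        have hxs : x ∉ seen := h ▸ hm
        have hseen' : x ∈ PySem.Set.add seen (pvName e) :=
          (PySem.Set.mem_add _ _ _).2 (Or.inr h.symm)
        cases hinc : pvInc e
        · rw [if_neg Bool.false_ne_true, ih]
          simp [hseen', hxs]
        · rw [if_pos rfl, ih]
          have hxr : x ∈ PySem.Set.add res (pvName e) :=
            (PySem.Set.mem_add _ _ _).2 (Or.inr h.symm)
          simp [hxr, hxs]
      · rw [if_neg h]
        have hxn : ¬ x = pvName e := fun hc => h hc.symm
        have hxs : x ∈ PySem.Set.add seen (pvName e) ↔ x ∈ seen := by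
          simp [PySem.Set.mem_add, hxn]
        cases hinc : pvInc e
        · rw [if_neg Bool.false_ne_true, ih]
          simp [hxs]
        · rw [if_pos rfl, ih]
          simp [PySem.Set.mem_add, hxn, hxs]

lemma foldA_nodup (l : List String) (s : PySem.Set String) (hs : s.Nodup) :
    (l.foldl pvStepA s).Nodup := by
  induction l generalizing s with
  | nil => exact hs
  | cons e rest ih =>
    rw [List.foldl_cons]
    apply ih
    unfold pvStepA
    split_ifs
    · exact PySem.Set.nodup_discard _ _ hs
    · exact PySem.Set.nodup_add _ _ hs

lemma foldB_nodup (m : List String) (seen res : PySem.Set String) (hr : res.Nodup) :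
    (m.foldl pvStepB (seen, res)).2.Nodup := by
  induction m generalizing seen res with
  | nil => exact hr
  | cons e rest ih =>
    rw [List.foldl_cons, pvStepB_eq]
    split_ifs
    · exact ih seen res hr
    · exact ih _ _ (PySem.Set.nodup_add _ _ hr)
    · exact ih _ _ hr

lemma sorted_congr_of_perm {xs ys : List String} (hn : xs.Nodup) (_hm : ys.Nodup)
    (hp : xs.Perm ys) :
    PySem.List.sorted xs (fun x => x) false = PySem.List.sorted ys (fun x => x) false := by
  have hzp : (PySem.List.sorted xs (fun x => x) false).Perm xs :=
    PySem.List.sorted_perm _ _ _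
  have hzn : (PySem.List.sorted xs (fun x => x) false).Nodup := hzp.nodup_iff.2 hn
  have hle : (PySem.List.sorted xs (fun x => x) false).Pairwise (fun a b => a ≤ b) :=
    PySem.List.sorted_pairwise _ _
  have hlt : (PySem.List.sorted xs (fun x => x) false).Pairwise
      (fun a b : String => a < b) :=
    (hle.and hzn).imp (fun h => lt_of_le_of_ne h.1 h.2)
  exact (PySem.List.sorted_eq_of_perm_of_pairwise_lt _ _ _ (hzp.trans hp) hlt).symm

-- ===== VERDICT (by name: the statement is the Claim_ definition above) =====
theorem consolidatePositiveList_spec : Claim_equal_consolidatePositiveList := by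
  intro elements _ _
  unfold Spec_consolidatePositiveList consolidatePositiveList consolidatePositiveList_alt
  simp only []
  have hA : (elements.foldl pvStepA PySem.Set.empty).Nodup :=
    foldA_nodup _ _ List.nodup_nil
  have hB : (elements.reverse.foldl pvStepB (PySem.Set.empty, PySem.Set.empty)).2.Nodup :=
    foldB_nodup _ _ _ List.nodup_nil
  apply sorted_congr_of_perm hA hB
  rw [List.perm_ext_iff_of_nodup hA hB]
  intro x
  rw [foldA_mem, foldB_mem]
  simp [PySem.Set.empty]
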